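-- pv_equiv track=rewrite | github.com/lukacslacko/rubikml | rubik_beam.py | simplify_repeats
-- ===== SOURCE A (Python) =====
-- def simplify_repeats(steps):
--     if len(steps) < 4:
--         return steps
--     first = steps[0]
--     count = 1
--     while count < len(steps) and steps[count] == first:
--         count += 1
--     if count >= 4:
--         return steps[4:]
--     return steps[:count] + simplify_repeats(steps[count:])
-- ===== SOURCE B (Python) =====
-- def simplify_repeats(steps):
--     run = 1
--     for i in range(1, len(steps)):
--         if steps[i] == steps[i - 1]:
--             run += 1
--             if run == 4:
--                 p = i - 3
--                 return steps[:p] + steps[p + 4:]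
--         else:
--             run = 1
--     return steps
-- ===== Notes on version B (the rewrite author's own statement) =====
-- stated objective: simpler
-- what changed: A recursively rebuilds the list run by run (while-loop counting each maximal leading run, then slicing and recursing); B is one non-recursive left-to-right scan keeping a single consecutive-equal counter and, at the first quadruple, returns one computed splice steps[:p]+steps[p+4:].
import Mathlib
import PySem

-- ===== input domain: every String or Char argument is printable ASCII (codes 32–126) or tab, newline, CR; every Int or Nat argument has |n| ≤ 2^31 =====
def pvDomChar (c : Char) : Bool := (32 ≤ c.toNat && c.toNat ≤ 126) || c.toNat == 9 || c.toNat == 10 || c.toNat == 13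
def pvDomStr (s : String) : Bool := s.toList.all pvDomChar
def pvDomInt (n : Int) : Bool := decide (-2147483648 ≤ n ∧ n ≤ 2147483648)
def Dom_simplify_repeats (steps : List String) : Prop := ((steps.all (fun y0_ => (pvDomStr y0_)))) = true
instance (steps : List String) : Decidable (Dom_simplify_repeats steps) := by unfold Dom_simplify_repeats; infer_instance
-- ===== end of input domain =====

-- B replaces A's run-by-run recursion (which rebuilds the list) by one non-recursive
-- scan with a consecutive-equal counter and a single splice; objective: simpler.

-- ===== PORT A =====
-- A's 'while count < len(steps) and steps[count] == first: count += 1' loop, as the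
-- obvious structural recursion over the elements after index 0 (counts them while equal)
def pvWhileCount (first : String) : List String → Nat
  | [] => 0
  | x :: xs => if x = first then pvWhileCount first xs + 1 else 0

-- A's recursion on steps[count:], with the list length as fuel (a totality guard only:
-- count ≥ 1, so the fuel never runs out on a reachable call)
def pvSimpGo : Nat → List String → List String
  | 0, steps => steps
  | _ + 1, [] => []
  | fuel + 1, first :: rest =>
    if (first :: rest).length < 4 then first :: rest
    else
      let count := pvWhileCount first rest + 1
      if 4 ≤ count then (first :: rest).drop 4
      else (first :: rest).take count ++ pvSimpGo fuel ((first :: rest).drop count)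

def simplify_repeats (steps : List String) : List String :=
  pvSimpGo steps.length steps

-- ===== PORT B =====
-- B's for-loop over i in range(1, len(steps)): walk the tail, prev = steps[i-1],
-- run = the consecutive-equal counter; returns the splice point of the first quadruple
def pvScanGo : String → Nat → Nat → List String → Option Nat
  | _, _, _, [] => none
  | prev, run, i, x :: xs =>
    if x = prev then
      if run + 1 = 4 then some (i - 3)
      else pvScanGo x (run + 1) (i + 1) xs
    else pvScanGo x 1 (i + 1) xs

def simplify_repeats_alt (steps : List String) : List String :=
  match steps with
  | [] => steps
  | x :: xs =>
    match pvScanGo x 1 1 xs with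
    | some p => steps.take p ++ steps.drop (p + 4)
    | none => steps

-- ===== PRECONDITION & SPEC =====
def Spec_simplify_repeats (steps : List String) (out : List String) : Prop := out = simplify_repeats_alt steps
instance (steps : List String) (out : List String) : Decidable (Spec_simplify_repeats steps out) := by unfold Spec_simplify_repeats; infer_instance

-- ===== CLAIM (what is proved, stated in full; the proofs are below) =====
def Claim_equal_simplify_repeats : Prop := ∀ (steps : List String), Dom_simplify_repeats steps → Spec_simplify_repeats steps (simplify_repeats steps)

-- ===== LEMMAS AND PROOFS =====

theorem alt_cons (x : String) (xs : List String) :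
    simplify_repeats_alt (x :: xs) =
      match pvScanGo x 1 1 xs with
      | some p => (x :: xs).take p ++ (x :: xs).drop (p + 4)
      | none => x :: xs := rfl

-- a scan with too little material left never finds a quadruple
theorem pvScanGo_none (ys : List String) : ∀ (prev : String) (run i : Nat),
    run + ys.length < 4 → pvScanGo prev run i ys = none := by
  induction ys with
  | nil => intro prev run i _; rfl
  | cons y ys ih =>
      intro prev run i h
      simp only [List.length_cons] at h
      rw [pvScanGo]
      by_cases he : y = prev
      · rw [if_pos he, if_neg (by omega)]
        exact ih y (run + 1) (i + 1) (by omega)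
      · rw [if_neg he]
        exact ih y 1 (i + 1) (by omega)

-- the start index only shifts the returned splice point
theorem pvScanGo_shift (ys : List String) : ∀ (prev : String) (run i k : Nat),
    run ≤ i → pvScanGo prev run (i + k) ys = (pvScanGo prev run i ys).map (· + k) := by
  induction ys with
  | nil => intro prev run i k _; rfl
  | cons y ys ih =>
      intro prev run i k hr
      rw [pvScanGo]; conv_rhs => rw [pvScanGo]
      by_cases he : y = prev
      · rw [if_pos he, if_pos he]
        by_cases h4 : run + 1 = 4
        · rw [if_pos h4, if_pos h4]
          simp only [Option.map_some]
          congr 1; omega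
        · rw [if_neg h4, if_neg h4, Nat.add_right_comm i k 1]
          exact ih y (run + 1) (i + 1) k (by omega)
      · rw [if_neg he, if_neg he, Nat.add_right_comm i k 1]
        exact ih y 1 (i + 1) k (by omega)

-- the while loop counts a maximal leading block of copies of `first`
theorem pvWhileCount_decomp (x : String) (xs : List String) :
    ∃ t, xs = List.replicate (pvWhileCount x xs) x ++ t ∧
      (∀ t0 t', t = t0 :: t' → t0 ≠ x) := by
  induction xs with
  | nil => exact ⟨[], rfl, by intro t0 t' h; cases h⟩
  | cons y ys ih =>
      by_cases he : y = x
      · obtain ⟨t, ht1, ht2⟩ := ih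
        refine ⟨t, ?_, ht2⟩
        rw [pvWhileCount, if_pos he, List.replicate_succ, List.cons_append, he]
        rw [← ht1]
      · refine ⟨y :: ys, ?_, ?_⟩
        · rw [pvWhileCount, if_neg he, List.replicate_zero, List.nil_append]
        · intro t0 t' h
          cases h; exact he

-- B's scan across a short (≤ 3 counting the head) maximal leading run: it just
-- shifts the scan of the remainder
theorem pvScan_run (x : String) (t0 : String) (t' : List String) (w : Nat) (hw : w ≤ 2)
    (hne : t0 ≠ x) :
    pvScanGo x 1 1 (List.replicate w x ++ t0 :: t') =
      (pvScanGo t0 1 1 t').map (· + (w + 1)) := by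
  obtain rfl | rfl | rfl : w = 0 ∨ w = 1 ∨ w = 2 := by omega
  · simp only [List.replicate_zero, List.nil_append]
    rw [pvScanGo, if_neg hne]
    exact pvScanGo_shift t' t0 1 1 1 (le_refl 1)
  · simp only [List.replicate_succ, List.replicate_zero, List.cons_append, List.nil_append]
    rw [pvScanGo, if_pos rfl, if_neg (by norm_num)]
    rw [pvScanGo, if_neg hne]
    exact pvScanGo_shift t' t0 1 1 2 (le_refl 1)
  · simp only [List.replicate_succ, List.replicate_zero, List.cons_append, List.nil_append]
    rw [pvScanGo, if_pos rfl, if_neg (by norm_num)]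
    rw [pvScanGo, if_pos rfl, if_neg (by norm_num)]
    rw [pvScanGo, if_neg hne]
    exact pvScanGo_shift t' t0 1 1 3 (le_refl 1)

-- main equivalence: the fuel recursion agrees with B's single scan
theorem pvSimpGo_eq_alt : ∀ (fuel : Nat) (steps : List String),
    steps.length ≤ fuel → pvSimpGo fuel steps = simplify_repeats_alt steps := by
  intro fuel
  induction fuel with
  | zero =>
      intro steps h
      have : steps = [] := List.eq_nil_of_length_eq_zero (by omega)
      subst this; rfl
  | succ fuel ih =>
      intro steps hlen
      cases steps with
      | nil => rfl
      | cons x xs =>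
      by_cases hshort : (x :: xs).length < 4
      · rw [pvSimpGo, if_pos hshort, alt_cons,
          pvScanGo_none xs x 1 1 (by simp only [List.length_cons] at hshort; omega)]
      · rw [pvSimpGo, if_neg hshort]
        obtain ⟨t, hxs, ht⟩ := pvWhileCount_decomp x xs
        obtain ⟨w, hw⟩ : ∃ w, pvWhileCount x xs = w := ⟨_, rfl⟩
        rw [hw] at hxs
        rw [hw]
        have hrep : (List.replicate w x).length = w := List.length_replicate ..
        by_cases h4 : 4 ≤ w + 1
        · -- leading run of length ≥ 4: A drops 4; B finds the quadruple at position 0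
          rw [if_pos h4]
          obtain ⟨w', rfl⟩ : ∃ w', w = w' + 3 := ⟨w - 3, by omega⟩
          simp only [List.replicate_succ, List.cons_append] at hxs
          have hscan0 : pvScanGo x 1 1 xs = some 0 := by
            rw [hxs]; simp [pvScanGo]
          rw [alt_cons, hscan0]
          simp
        · -- leading run of length ≤ 3: A keeps it and recurses on the rest
          rw [if_neg h4]
          have hdropc : (x :: xs).drop (w + 1) = t := by
            rw [List.drop_succ_cons, hxs]
            exact List.drop_left' hrep
          have hlt : t.length ≤ fuel := by
            have := congrArg List.length hxs
            simp only [List.length_append, hrep] at this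
            simp only [List.length_cons] at hlen
            omega
          rw [hdropc, ih t hlt]
          cases t with
          | nil =>
              -- impossible: the whole list is the short run, but length ≥ 4
              exfalso
              have := congrArg List.length hxs
              simp only [List.length_append, hrep, List.length_nil] at this
              simp only [List.length_cons] at hshort
              omega
          | cons t0 t' =>
              have hne : t0 ≠ x := ht t0 t' rfl
              have hscan : pvScanGo x 1 1 xs = (pvScanGo t0 1 1 t').map (· + (w + 1)) := by
                rw [hxs]
                exact pvScan_run x t0 t' w (by omega) hne
              rw [alt_cons x xs, alt_cons t0 t', hscan]
              cases hq : pvScanGo t0 1 1 t' with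
              | none =>
                  simp only [Option.map_none]
                  rw [← hdropc, List.take_append_drop]
              | some q =>
                  simp only [Option.map_some]
                  have htake : (x :: xs).take (q + (w + 1)) =
                      (x :: xs).take (w + 1) ++ ((x :: xs).drop (w + 1)).take q := by
                    rw [Nat.add_comm q (w + 1), List.take_add]
                  have hdrop : (x :: xs).drop (q + (w + 1) + 4) =
                      ((x :: xs).drop (w + 1)).drop (q + 4) := by
                    rw [List.drop_drop]; congr 1; omega
                  rw [htake, hdrop, hdropc, List.append_assoc]

-- ===== VERDICT (by name: the statement is the Claim_ definition above) =====
theorem simplify_repeats_spec : Claim_equal_simplify_repeats := by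
  intro steps _
  exact pvSimpGo_eq_alt steps.length steps (le_refl _)
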